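-- pv_equiv track=rewrite | github.com/inchrysi/Rosalind | FindingSharedMotifs.py | commonSub1
-- ===== SOURCE A (Python) =====
-- def commonSub1(s1, s2):
--
--     common = ''
--     commonsubs = []
--
--
--     if len(s1) == len(s2):
--         common = ''
--         for i in range(len(s1)):
--             if s1[i] == s2[i]:
--                 common+= s1[i]
--                 commonsubs.append(common)
--             else:
--                 common = ''
--
--     else:
--         l = 0
--         if len(s1) < len(s2):
--             l = len(s1)
--             diff = len(s2) - l
--             for i in range(l):
--                 if s1[i] == s2[i]:
--                     common+= s1[i]
--                     commonsubs.append(common)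
--                 else:
--                     common = ''
--             for i in range(l, l + diff):
--                 if s2[i] in s1:
--                     common+= s2[i]
--                     commonsubs.append(common)
--                 else:
--                     common = ''
--
--         else:
--             l = len(s2)
--             diff = len(s1) - l
--
--             for i in range(l):
--                 if s1[i] == s2[i]:
--                     common+= s1[i]
--                     commonsubs.append(common)
--                 else:
--                     common = ''
--             for i in range(l, l + diff):
--                 if s1[i] in s2:
--                     common+= s1[i]
--                     commonsubs.append(common)
--                 else:
--                     common = ''
--
--     maxlen = 0
--     for x in commonsubs:
--         if len(x) > maxlen:
--             maxlen = len(x)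
--
--     longestsubs = []
--
--     for x in commonsubs:
--         if len(x) >= maxlen:
--             longestsubs.append(x)
--
--     return commonsubs
-- ===== SOURCE B (Python) =====
-- def commonSub1(s1, s2):
--     # Phase 1: one pass computing (char, is_match) for every index of the longer string.
--     shorter, longer = (s1, s2) if len(s1) <= len(s2) else (s2, s1)
--     flags = [(longer[i], s1[i] == s2[i] if i < len(shorter) else longer[i] in shorter)
--              for i in range(len(longer))]
--     # Phase 2: split into maximal runs of consecutive matches.
--     runs = []
--     cur = ''
--     for c, ok in flags:
--         if ok:
--             cur += c
--         elif cur: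
--             runs.append(cur)
--             cur = ''
--         else:
--             cur = ''
--     if cur:
--         runs.append(cur)
--     # Phase 3: each run contributes its successive non-empty prefixes, in order.
--     out = []
--     for r in runs:
--         for k in range(1, len(r) + 1):
--             out.append(r[:k])
--     return out
-- ===== Notes on version B (the rewrite author's own statement) =====
-- stated objective: alternative
-- what changed: Replaced A's three duplicated stateful branch loops (equal / shorter-first / shorter-second) by a three-phase pipeline: one pass building a (char, is_match) flag sequence over the longer string, splitting it into maximal match runs, then expanding each run into its successive prefixes.
import Mathlib
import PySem

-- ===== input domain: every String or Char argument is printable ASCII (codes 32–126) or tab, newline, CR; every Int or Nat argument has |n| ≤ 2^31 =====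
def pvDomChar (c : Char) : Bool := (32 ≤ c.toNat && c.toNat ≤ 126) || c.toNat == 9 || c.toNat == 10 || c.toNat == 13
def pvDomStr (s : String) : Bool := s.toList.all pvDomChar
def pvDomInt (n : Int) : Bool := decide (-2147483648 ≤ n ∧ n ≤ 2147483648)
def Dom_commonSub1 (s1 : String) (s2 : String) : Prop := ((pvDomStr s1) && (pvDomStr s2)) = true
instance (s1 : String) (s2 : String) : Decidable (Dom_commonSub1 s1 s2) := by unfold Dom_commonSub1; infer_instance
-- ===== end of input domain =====

-- B replaces A's three duplicated stateful branch loops by a flag-sequence / run-split / prefix-expansion pipeline (objective: alternative decomposition, same cost).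

-- ===== PORT A =====
-- positional-equality loop body ('if s1[i] == s2[i]: common += s1[i]; commonsubs.append(common) else: common = ""')
def pvStepEq (a b : List Char) (st : List Char × List String) (i : Nat) : List Char × List String :=
  if a.getD i ' ' = b.getD i ' ' then
    (st.1 ++ [a.getD i ' '], st.2 ++ [String.mk (st.1 ++ [a.getD i ' '])])
  else ([], st.2)

-- membership loop body ('if src[i] in tgt: common += src[i]; commonsubs.append(common) else: common = ""')
def pvStepMem (src tgt : List Char) (st : List Char × List String) (i : Nat) : List Char × List String :=
  if src.getD i ' ' ∈ tgt then
    (st.1 ++ [src.getD i ' '], st.2 ++ [String.mk (st.1 ++ [src.getD i ' '])])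
  else ([], st.2)

def commonSub1 (s1 : String) (s2 : String) : List String :=
  let a := s1.toList
  let b := s2.toList
  let commonsubs :=
    if a.length = b.length then
      ((List.range a.length).foldl (pvStepEq a b) ([], [])).2
    else if a.length < b.length then
      let l := a.length
      let st1 := (List.range l).foldl (pvStepEq a b) ([], [])
      ((List.range' l (b.length - l)).foldl (pvStepMem b a) st1).2
    else
      let l := b.length
      let st1 := (List.range l).foldl (pvStepEq a b) ([], [])
      ((List.range' l (a.length - l)).foldl (pvStepMem a b) st1).2
  -- A's dead code (maxlen / longestsubs are computed and discarded):
  let maxlen := commonsubs.foldl (fun m x => if x.toList.length > m then x.toList.length else m) 0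
  let _longestsubs := commonsubs.foldl (fun acc x => if x.toList.length ≥ maxlen then acc ++ [x] else acc) ([] : List String)
  commonsubs

-- ===== PORT B =====
-- Phase 1: (char, is_match) for every index of the longer string
def pvFlags (s1 s2 : String) : List (Char × Bool) :=
  let shorter := if s1.toList.length ≤ s2.toList.length then s1.toList else s2.toList
  let longer := if s1.toList.length ≤ s2.toList.length then s2.toList else s1.toList
  (List.range longer.length).map (fun i =>
    (longer.getD i ' ',
     if i < shorter.length then decide (s1.toList.getD i ' ' = s2.toList.getD i ' ')
     else decide (longer.getD i ' ' ∈ shorter)))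

-- Phase 2 loop body: extend the current run or close it off
def pvRunStep (st : List Char × List (List Char)) (p : Char × Bool) : List Char × List (List Char) :=
  if p.2 then (st.1 ++ [p.1], st.2)
  else if st.1 ≠ [] then ([], st.2 ++ [st.1]) else ([], st.2)

-- Phase 3: the successive non-empty prefixes r[:1], …, r[:len(r)] of one run
def pvExpand (r : List Char) : List String :=
  (PySem.List.pyRange 1 ((r.length : Int) + 1) 1).map (fun k => String.mk (r.take k.toNat))

def commonSub1_alt (s1 : String) (s2 : String) : List String :=
  let st := (pvFlags s1 s2).foldl pvRunStep ([], [])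
  let runs := if st.1 ≠ [] then st.2 ++ [st.1] else st.2
  runs.flatMap pvExpand

-- ===== PRECONDITION & SPEC =====
def Spec_commonSub1 (s1 : String) (s2 : String) (out : List String) : Prop := out = commonSub1_alt s1 s2
instance (s1 : String) (s2 : String) (out : List String) : Decidable (Spec_commonSub1 s1 s2 out) := by unfold Spec_commonSub1; infer_instance

-- ===== CLAIM (what is proved, stated in full; the proofs are below) =====
def Claim_equal_commonSub1 : Prop := ∀ (s1 : String) (s2 : String), Dom_commonSub1 s1 s2 → Spec_commonSub1 s1 s2 (commonSub1 s1 s2)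

-- ===== LEMMAS AND PROOFS =====

-- A's loop body expressed on a (char, flag) pair
def pvEmit (st : List Char × List String) (p : Char × Bool) : List Char × List String :=
  if p.2 then (st.1 ++ [p.1], st.2 ++ [String.mk (st.1 ++ [p.1])]) else ([], st.2)

-- the emit fold only appends to its output component
theorem pvEmit_acc (ps : List (Char × Bool)) (c : List Char) (acc : List String) :
    ps.foldl pvEmit (c, acc) = ((ps.foldl pvEmit (c, [])).1, acc ++ (ps.foldl pvEmit (c, [])).2) := by
  induction ps generalizing c acc with
  | nil => simp
  | cons p rest ih =>
    simp only [List.foldl_cons, pvEmit]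
    cases hp : p.2
    · simp only [Bool.false_eq_true, if_false]
      rw [ih [] acc, ih [] ([] : List String)]
    · simp only [if_true, List.nil_append]
      rw [ih (c ++ [p.1]) (acc ++ [String.mk (c ++ [p.1])]), ih (c ++ [p.1]) [String.mk (c ++ [p.1])]]
      simp

-- the run-split fold only appends to its runs component
theorem pvRunStep_acc (ps : List (Char × Bool)) (c : List Char) (rs : List (List Char)) :
    ps.foldl pvRunStep (c, rs) = ((ps.foldl pvRunStep (c, [])).1, rs ++ (ps.foldl pvRunStep (c, [])).2) := by
  induction ps generalizing c rs with
  | nil => simp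
  | cons p rest ih =>
    simp only [List.foldl_cons, pvRunStep]
    cases hp : p.2
    · simp only [Bool.false_eq_true, if_false]
      by_cases hc : c = []
      · simp only [hc, ne_eq, not_true_eq_false, if_false]
        rw [ih [] rs, ih [] ([] : List (List Char))]
      · simp only [ne_eq, hc, not_false_eq_true, if_true, List.nil_append]
        rw [ih [] (rs ++ [c]), ih [] [c]]
        simp
    · simp only [if_true]
      rw [ih (c ++ [p.1]) rs, ih (c ++ [p.1]) ([] : List (List Char))]

-- appending one char to a run appends one prefix to its expansion
theorem pvExpand_snoc (c : List Char) (x : Char) :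
    pvExpand (c ++ [x]) = pvExpand c ++ [String.mk (c ++ [x])] := by
  unfold pvExpand
  have h1 : (((c ++ [x]).length : Int) + 1) = ((c.length : Int) + 1) + 1 := by
    simp
  rw [h1, PySem.List.pyRange_one_succ_right (by omega), List.map_append]
  congr 1
  · apply List.map_congr_left
    intro k hk
    rw [PySem.List.mem_pyRange_one] at hk
    have hle : k.toNat ≤ c.length := by omega
    rw [List.take_append_of_le_length hle]
  · simp only [List.map_cons, List.map_nil]
    congr 1
    rw [List.take_of_length_le (by simp)]

theorem pvExpand_nil : pvExpand [] = [] := by decide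

-- core: A's emit fold produces exactly B's run expansions, offset by the carried run's own prefixes
theorem pvCore (ps : List (Char × Bool)) (c : List Char) :
    pvExpand c ++ (ps.foldl pvEmit (c, [])).2 =
      (if (ps.foldl pvRunStep (c, [])).1 ≠ [] then
          (ps.foldl pvRunStep (c, [])).2 ++ [(ps.foldl pvRunStep (c, [])).1]
        else (ps.foldl pvRunStep (c, [])).2).flatMap pvExpand := by
  induction ps generalizing c with
  | nil =>
    by_cases hc : c = [] <;> simp [hc, pvExpand_nil]
  | cons p rest ih =>
    simp only [List.foldl_cons, pvEmit, pvRunStep]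
    cases hp : p.2
    · simp only [Bool.false_eq_true, if_false]
      by_cases hc : c = []
      · simp only [hc, ne_eq, not_true_eq_false, if_false, pvExpand_nil, List.nil_append]
        exact ih []
      · simp only [ne_eq, hc, not_false_eq_true, if_true, List.nil_append]
        rw [pvRunStep_acc rest [] [c]]
        have h0 := ih []
        simp only [pvExpand_nil, List.nil_append] at h0
        by_cases hf : (rest.foldl pvRunStep ([], [])).1 = [] <;>
          simp [hf, h0, List.flatMap_append]
    · simp only [if_true, List.nil_append]
      rw [pvEmit_acc rest (c ++ [p.1]) [String.mk (c ++ [p.1])]]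
      have h1 := ih (c ++ [p.1])
      rw [pvExpand_snoc] at h1
      simpa [List.append_assoc] using h1

theorem range_split (n m : Nat) (h : n ≤ m) : List.range m = List.range n ++ List.range' n (m - n) := by
  rw [List.range_eq_range', List.range_eq_range', show m = n + (m - n) by omega, ← List.range'_append]
  simp

-- A's branchy index loops compute exactly the emit fold over B's flag sequence
theorem pvFlags_foldl (s1 s2 : String) :
    commonSub1 s1 s2 = ((pvFlags s1 s2).foldl pvEmit ([], [])).2 := by
  unfold commonSub1 pvFlags
  dsimp only
  rw [List.foldl_map]
  by_cases hle : s1.toList.length ≤ s2.toList.length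
  · rw [if_pos hle, if_pos hle]
    by_cases heq : s1.toList.length = s2.toList.length
    · rw [if_pos heq, heq]
      congr 1
      apply PySem.List.foldl_congr_mem
      intro st i hi
      rw [List.mem_range] at hi
      simp only [pvStepEq, pvEmit]
      rw [if_pos hi]
      simp only [decide_eq_true_eq]
      split_ifs with h
      · rw [h]
      · rfl
    · rw [if_neg heq, if_pos (show s1.toList.length < s2.toList.length by omega)]
      rw [range_split s1.toList.length s2.toList.length hle, List.foldl_append]
      have hpos : (List.range s1.toList.length).foldl
          (fun st i => pvEmit st (s2.toList.getD i ' ',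
            if i < s1.toList.length then decide (s1.toList.getD i ' ' = s2.toList.getD i ' ')
            else decide (s2.toList.getD i ' ' ∈ s1.toList))) ([], []) =
          (List.range s1.toList.length).foldl (pvStepEq s1.toList s2.toList) ([], []) := by
        apply PySem.List.foldl_congr_mem
        intro st i hi
        rw [List.mem_range] at hi
        simp only [pvStepEq, pvEmit]
        rw [if_pos hi]
        simp only [decide_eq_true_eq]
        split_ifs with h
        · rw [h]
        · rfl
      rw [hpos]
      congr 1
      apply PySem.List.foldl_congr_mem
      intro st i hi
      rw [List.mem_range'_1] at hi
      simp only [pvStepMem, pvEmit]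
      rw [if_neg (show ¬ i < s1.toList.length by omega)]
      simp only [decide_eq_true_eq]
  · rw [if_neg hle, if_neg hle,
      if_neg (show ¬ s1.toList.length = s2.toList.length by omega),
      if_neg (show ¬ s1.toList.length < s2.toList.length by omega)]
    rw [range_split s2.toList.length s1.toList.length (by omega), List.foldl_append]
    have hpos : (List.range s2.toList.length).foldl
        (fun st i => pvEmit st (s1.toList.getD i ' ',
          if i < s2.toList.length then decide (s1.toList.getD i ' ' = s2.toList.getD i ' ')
          else decide (s1.toList.getD i ' ' ∈ s2.toList))) ([], []) =
        (List.range s2.toList.length).foldl (pvStepEq s1.toList s2.toList) ([], []) := by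
      apply PySem.List.foldl_congr_mem
      intro st i hi
      rw [List.mem_range] at hi
      simp only [pvStepEq, pvEmit]
      rw [if_pos hi]
      simp only [decide_eq_true_eq]
    rw [hpos]
    congr 1
    apply PySem.List.foldl_congr_mem
    intro st i hi
    rw [List.mem_range'_1] at hi
    simp only [pvStepMem, pvEmit]
    rw [if_neg (show ¬ i < s2.toList.length by omega)]
    simp only [decide_eq_true_eq]

-- ===== VERDICT (by name: the statement is the Claim_ definition above) =====
theorem commonSub1_spec : Claim_equal_commonSub1 := by
  intro s1 s2 _
  unfold Spec_commonSub1
  have core := pvCore (pvFlags s1 s2) []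
  simp only [pvExpand_nil, List.nil_append] at core
  rw [pvFlags_foldl, core]
  rfl
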